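-- pv_equiv track=rewrite | github.com/sakshamthukral/DSA | DynamicProgramming/minimalCost.py | minimalCost2
-- ===== SOURCE A (Python) =====
-- def minimalCost2(heights, n, k):
--     dp = [-1]*n
--     dp[0] = 0 # because min cost to reach the first index/step will definitely be 0
--     for i in range(1,n):
--         minCost = float('inf')
--         for j in range(1,k+1):
--             if i-j>=0:
--                 cost = dp[i-j] + abs(heights[i]-heights[i-j])
--                 minCost = min(minCost, cost)
--         dp[i] = minCost
--     return dp[n-1] # last index of the dp array will be storeing tha minimum cost to reach the last index
-- ===== SOURCE B (Python) =====
-- def minimalCost2(heights, n, k):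
--     # Bellman-Ford on the jump graph: build the edge list once, then relax
--     # every edge repeatedly (at most n-1 passes) until a full pass changes nothing.
--     edges = []
--     for i in range(n):
--         for j in range(1, k + 1):
--             if i + j < n:
--                 edges.append((i, i + j, abs(heights[i + j] - heights[i])))
--     INF = float('inf')
--     dp = [INF] * n
--     dp[0] = 0
--     for _ in range(n - 1):
--         changed = False
--         for u, v, w in edges:
--             if dp[u] + w < dp[v]:
--                 dp[v] = dp[u] + w
--                 changed = True
--         if not changed:
--             break
--     return dp[n - 1]
-- ===== Notes on version B (the rewrite author's own statement) =====
-- stated objective: alternative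
-- what changed: Replaced the index-wise DP recurrence by Bellman-Ford on the jump graph: B materialises the edge list (i, i+j, |h[i+j]-h[i]|) once, then runs up to n-1 full relaxation passes over that edge list with a changed-flag early exit, instead of computing each dp cell by scanning its k predecessors.
-- outside the precondition, e.g. on minimalCost2([3, 1], 2, 0): A returns inf, B returns inf; on minimalCost2([1, 2], 3, 2): A raises IndexError, B raises IndexError
import Mathlib
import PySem

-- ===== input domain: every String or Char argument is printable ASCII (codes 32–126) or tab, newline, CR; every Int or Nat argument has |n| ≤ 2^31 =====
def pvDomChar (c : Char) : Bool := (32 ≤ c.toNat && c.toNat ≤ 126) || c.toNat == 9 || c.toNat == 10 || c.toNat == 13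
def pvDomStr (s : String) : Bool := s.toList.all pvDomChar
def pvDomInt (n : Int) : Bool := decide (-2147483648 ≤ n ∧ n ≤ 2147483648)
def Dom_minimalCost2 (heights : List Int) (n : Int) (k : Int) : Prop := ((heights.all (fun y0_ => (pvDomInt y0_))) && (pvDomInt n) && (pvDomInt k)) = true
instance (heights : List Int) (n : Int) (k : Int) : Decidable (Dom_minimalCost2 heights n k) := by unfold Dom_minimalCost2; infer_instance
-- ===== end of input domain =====

-- B replaces A's index-wise DP recurrence by Bellman-Ford on the jump graph: it builds the
-- edge list once, then runs up to n-1 full relaxation passes with a changed-flag early exit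
-- (objective: alternative; same O(n*k) cost thanks to the early exit).

-- Python's float('inf') occurs in both programs; it is modelled as `none : Option Int`
-- (none = +inf) with the arithmetic/comparison helpers below, shared by the two ports.
def oadd (o : Option Int) (c : Int) : Option Int := o.map (· + c)
def omin : Option Int → Option Int → Option Int
  | none, b => b
  | some x, none => some x
  | some x, some y => some (min x y)
def olt : Option Int → Option Int → Bool
  | none, _ => false
  | some _, none => true
  | some x, some y => decide (x < y)

-- ===== PORT A =====
def minimalCost2 (heights : List Int) (n : Int) (k : Int) : Int :=
  let dp0 : List (Option Int) := (List.replicate n.toNat (some (-1))).set 0 (some 0)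
  let dp := (PySem.List.pyRange 1 n 1).foldl (fun dp i =>
      let minCost := (PySem.List.pyRange 1 (k+1) 1).foldl (fun mc j =>
          if i - j ≥ 0 then
            omin mc (oadd (PySem.List.pyGetD dp (i-j) none)
                     |PySem.List.pyGetD heights i 0 - PySem.List.pyGetD heights (i-j) 0|)
          else mc) none
      dp.set i.toNat minCost) dp0
  (PySem.List.pyGetD dp (n-1) none).getD 0

-- ===== PORT B =====
-- one full pass over the edge list: relax every edge, flag whether anything changed
def bfPass (edges : List (Int × Int × Int)) (dp : List (Option Int)) :
    List (Option Int) × Bool :=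
  edges.foldl (fun st e =>
    if olt (oadd (PySem.List.pyGetD st.1 e.1 none) e.2.2) (PySem.List.pyGetD st.1 e.2.1 none) then
      (st.1.set e.2.1.toNat (oadd (PySem.List.pyGetD st.1 e.1 none) e.2.2), true)
    else st) (dp, false)

-- `for _ in range(n-1): …; if not changed: break`
def bfLoop (edges : List (Int × Int × Int)) : Nat → List (Option Int) → List (Option Int)
  | 0, dp => dp
  | t+1, dp =>
    let r := bfPass edges dp
    if r.2 then bfLoop edges t r.1 else r.1

def minimalCost2_alt (heights : List Int) (n : Int) (k : Int) : Int :=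
  let edges := (PySem.List.pyRange 0 n 1).foldl (fun es i =>
    (PySem.List.pyRange 1 (k+1) 1).foldl (fun es j =>
      if i + j < n then
        es ++ [(i, i + j, |PySem.List.pyGetD heights (i + j) 0 - PySem.List.pyGetD heights i 0|)]
      else es) es) ([] : List (Int × Int × Int))
  let dp0 : List (Option Int) := (List.replicate n.toNat (none : Option Int)).set 0 (some 0)
  let dp := bfLoop edges (n - 1).toNat dp0
  (PySem.List.pyGetD dp (n - 1) none).getD 0

-- ===== PRECONDITION & SPEC =====
-- Pre_ excludes inputs where A raises IndexError (n < 1, or n > len(heights) with n ≥ 2) and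
-- inputs with n ≥ 2 and k ≤ 0, where A returns float('inf') — a float, not a value of the
-- declared int return type.
def Pre_minimalCost2 (heights : List Int) (n : Int) (k : Int) : Prop :=
  n = 1 ∨ (2 ≤ n ∧ n ≤ heights.length ∧ 1 ≤ k)
instance (heights : List Int) (n : Int) (k : Int) : Decidable (Pre_minimalCost2 heights n k) := by
  unfold Pre_minimalCost2; infer_instance
def pvWitness_minimalCost2 : List Int × Int × Int := ([3, 1, 4, 1, 5], 5, 2)

def Spec_minimalCost2 (heights : List Int) (n : Int) (k : Int) (out : Int) : Prop := out = minimalCost2_alt heights n k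
instance (heights : List Int) (n : Int) (k : Int) (out : Int) : Decidable (Spec_minimalCost2 heights n k out) := by unfold Spec_minimalCost2; infer_instance

-- ===== CLAIM (what is proved, stated in full; the proofs are below) =====
def Claim_equal_minimalCost2 : Prop := ∀ (heights : List Int) (n : Int) (k : Int), Dom_minimalCost2 heights n k → Pre_minimalCost2 heights n k → Spec_minimalCost2 heights n k (minimalCost2 heights n k)

-- ===== LEMMAS AND PROOFS =====

-- The common reference computation: `tableC H K t` is the pull-DP table for indices 0..t
-- (H = height lookup, K = number of allowed jump lengths), `Fv H K t` its entry at index t.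
def edgeC (H : Nat → Int) (a b : Nat) : Int := |H a - H b|

def nextVal (H : Nat → Int) (K : Nat) (dp : List (Option Int)) : Option Int :=
  (List.range K).foldl (fun mc jm1 =>
    if jm1 + 1 ≤ dp.length then
      omin mc (oadd (dp.getD (dp.length - (jm1+1)) none)
               (edgeC H dp.length (dp.length - (jm1+1))))
    else mc) none

def tableC (H : Nat → Int) (K : Nat) : Nat → List (Option Int)
  | 0 => [some 0]
  | t+1 => tableC H K t ++ [nextVal H K (tableC H K t)]

def Fv (H : Nat → Int) (K : Nat) (t : Nat) : Option Int := (tableC H K t).getD t none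

-- value of cell t of an edge-ordered relaxation sweep after the first i source indices
def Pfun (H : Nat → Int) (K : Nat) (i t : Nat) : Option Int :=
  (List.range i).foldl
    (fun acc p => if p < t ∧ t - p ≤ K then omin acc (oadd (Fv H K p) (edgeC H t p)) else acc)
    (if t = 0 then some 0 else none)

-- the edge produced by source index i and jump jm1+1, and single-edge relaxation
def Ei (heights : List Int) (i jm1 : Nat) : Int × Int × Int :=
  ((i:Int), (i:Int) + (1 + (jm1:Int)),
   |PySem.List.pyGetD heights ((i:Int) + (1 + (jm1:Int))) 0 - PySem.List.pyGetD heights (i:Int) 0|)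

def relaxE (dp : List (Option Int)) (e : Int × Int × Int) : List (Option Int) :=
  if olt (oadd (PySem.List.pyGetD dp e.1 none) e.2.2) (PySem.List.pyGetD dp e.2.1 none) then
    dp.set e.2.1.toNat (oadd (PySem.List.pyGetD dp e.1 none) e.2.2)
  else dp

theorem length_tableC (H : Nat → Int) (K t : Nat) : (tableC H K t).length = t + 1 := by
  induction t with
  | zero => rfl
  | succ t ih => simp [tableC, ih]

theorem tableC_getD (H : Nat → Int) (K : Nat) {p t : Nat} (hp : p ≤ t) :
    (tableC H K t).getD p none = Fv H K p := by
  induction t with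
  | zero =>
    have h0 : p = 0 := by omega
    subst h0; rfl
  | succ t ih =>
    rcases Nat.lt_or_ge p (t+1) with h | h
    · rw [show tableC H K (t+1) = tableC H K t ++ [nextVal H K (tableC H K t)] from rfl,
          List.getD_append _ _ _ _ (by rw [length_tableC]; omega)]
      exact ih (by omega)
    · have h1 : p = t+1 := by omega
      subst h1; rfl

theorem Fv_succ (H : Nat → Int) (K t : Nat) :
    Fv H K (t+1) = nextVal H K (tableC H K t) := by
  unfold Fv
  rw [show tableC H K (t+1) = tableC H K t ++ [nextVal H K (tableC H K t)] from rfl]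
  have h2 : (tableC H K t).length = t + 1 := length_tableC H K t
  rw [← h2]
  simp

theorem Fv_succ' (H : Nat → Int) (K t : Nat) :
    Fv H K (t+1) = (List.range K).foldl (fun mc jm1 =>
      if jm1 + 1 ≤ t + 1 then
        omin mc (oadd (Fv H K (t - jm1)) (edgeC H (t+1) (t - jm1)))
      else mc) none := by
  rw [Fv_succ]
  unfold nextVal
  rw [length_tableC]
  apply PySem.List.foldl_congr_mem
  intro mc jm1 _
  by_cases h : jm1 + 1 ≤ t + 1
  · rw [if_pos h, if_pos h, show t + 1 - (jm1 + 1) = t - jm1 from by omega,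
        tableC_getD H K (Nat.sub_le t jm1)]
  · rw [if_neg h, if_neg h]

theorem omin_rcomm (b a₁ a₂ : Option Int) : omin (omin b a₁) a₂ = omin (omin b a₂) a₁ := by
  cases b <;> cases a₁ <;> cases a₂ <;> simp [omin, min_comm, min_left_comm]

theorem olt_omin (c d : Option Int) : (if olt c d then c else d) = omin d c := by
  cases c <;> cases d <;> simp [olt, omin, min_def] <;> split_ifs <;> simp_all <;> omega

theorem set_getD_self (l : List (Option Int)) (t : Nat) : l.set t (l.getD t none) = l := by
  apply List.ext_getElem
  · simp
  · intro i h1 h2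
    rw [List.getElem_set]
    split_ifs with he
    · subst he; simp [List.getD_eq_getElem?_getD, List.getElem?_eq_getElem h2]
    · rfl

theorem set_map_range (N t : Nat) (f : Nat → Option Int) (v : Option Int) :
    ((List.range N).map f).set t v = (List.range N).map (fun x => if x = t then v else f x) := by
  apply List.ext_getElem
  · simp
  · intro i h1 h2
    simp only [List.getElem_set, List.getElem_map, List.getElem_range]
    simp only [List.length_set, List.length_map, List.length_range] at h1
    split_ifs <;> first | rfl | omega

theorem foldl_guard_filter (l : List Nat) (g : Nat → Prop) [DecidablePred g]
    (v : Nat → Option Int) (a : Option Int) :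
    l.foldl (fun acc x => if g x then omin acc (v x) else acc) a
      = ((l.filter (fun x => decide (g x))).map v).foldl omin a := by
  induction l generalizing a with
  | nil => rfl
  | cons x l ih =>
    by_cases h : g x <;> simp [h, ih]

theorem Pfun_succ (H : Nat → Int) (K i t : Nat) :
    Pfun H K (i+1) t
      = if i < t ∧ t - i ≤ K then omin (Pfun H K i t) (oadd (Fv H K i) (edgeC H t i))
        else Pfun H K i t := by
  unfold Pfun
  rw [List.range_succ, List.foldl_append]
  simp

theorem Pfun_stable (H : Nat → Int) (K : Nat) {i t : Nat} (h : t ≤ i) :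
    Pfun H K i t = Pfun H K t t := by
  induction i with
  | zero =>
    have ht : t = 0 := by omega
    subst ht; rfl
  | succ i ih =>
    rcases Nat.lt_or_ge t (i+1) with hlt | hge
    · rw [Pfun_succ, if_neg (by omega), ih (by omega)]
    · have ht : t = i + 1 := by omega
      subst ht; rfl

theorem Pfun_diag (H : Nat → Int) (K t : Nat) : Pfun H K t t = Fv H K t := by
  cases t with
  | zero => rfl
  | succ t =>
    unfold Pfun
    rw [if_neg (by omega)]
    rw [foldl_guard_filter (List.range (t+1)) (fun p => p < t+1 ∧ t+1 - p ≤ K)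
        (fun p => oadd (Fv H K p) (edgeC H (t+1) p)) none]
    rw [Fv_succ']
    rw [foldl_guard_filter (List.range K) (fun jm1 => jm1 + 1 ≤ t+1)
        (fun jm1 => oadd (Fv H K (t - jm1)) (edgeC H (t+1) (t - jm1))) none]
    rw [show (fun jm1 => oadd (Fv H K (t - jm1)) (edgeC H (t+1) (t - jm1)))
          = (fun p => oadd (Fv H K p) (edgeC H (t+1) p)) ∘ (fun jm1 => t - jm1) from rfl,
        ← List.map_map]
    have nd1 : ((List.range (t+1)).filter (fun p => decide (p < t+1 ∧ t+1 - p ≤ K))).Nodup :=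
      (List.nodup_range).filter _
    have nd2 : (((List.range K).filter (fun (jm1 : Nat) => decide (jm1 + 1 ≤ t+1))).map
        (fun jm1 => t - jm1)).Nodup := by
      apply List.Nodup.map_on _ ((List.nodup_range).filter _)
      intro x hx y hy he
      simp only [List.mem_filter, List.mem_range, decide_eq_true_eq] at hx hy
      omega
    have hmem : ∀ a, a ∈ (List.range (t+1)).filter (fun p => decide (p < t+1 ∧ t+1 - p ≤ K)) ↔
        a ∈ ((List.range K).filter (fun jm1 => jm1 + 1 ≤ t+1)).map (fun jm1 => t - jm1) := by
      intro a
      simp only [List.mem_filter, List.mem_range, List.mem_map, decide_eq_true_eq]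
      constructor
      · rintro ⟨h1, h2, h3⟩
        exact ⟨t - a, ⟨by omega, by omega⟩, by omega⟩
      · rintro ⟨x, ⟨hx1, hx2⟩, rfl⟩
        omega
    have hperm := (List.perm_ext_iff_of_nodup nd1 nd2).mpr hmem
    exact @List.Perm.foldl_eq _ _ omin _ _ ⟨omin_rcomm⟩ (hperm.map _) none

theorem relax_eq_set_omin (l : List (Option Int)) (t : Nat) (c : Option Int) :
    (if olt c (l.getD t none) then l.set t c else l) = l.set t (omin (l.getD t none) c) := by
  rw [← olt_omin]
  split_ifs
  · rfl
  · exact (set_getD_self l t).symm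

theorem set_append_cons (l1 l2 : List (Option Int)) (a v : Option Int) :
    (l1 ++ a :: l2).set l1.length v = l1 ++ v :: l2 := by
  induction l1 with
  | nil => rfl
  | cons x l1 ih => simp [ih]

theorem set_append_cons' (l1 l2 : List (Option Int)) (a v : Option Int) (i : Nat)
    (h : i = l1.length) : (l1 ++ a :: l2).set i v = l1 ++ v :: l2 := by
  subst h; exact set_append_cons l1 l2 a v


-- effect of one outer iteration of A's pull loop (index 1+m)
theorem Astep (heights : List Int) (N K m : Nat) (hm : m + 1 ≤ N - 1) :
    ((tableC (fun t => heights.getD t 0) K m ++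
        List.replicate (N - 1 - m) (some (-1))).set ((1:Int) + (m : Int)).toNat
      (List.foldl (fun (mc : Option Int) (jm1 : Nat) =>
          if (1:Int) + (m:Int) - (1 + (jm1:Int)) ≥ 0 then
            omin mc (oadd (PySem.List.pyGetD
                (tableC (fun t => heights.getD t 0) K m ++
                  List.replicate (N - 1 - m) (some (-1))) ((1:Int) + (m:Int) - (1 + (jm1:Int))) none)
              |PySem.List.pyGetD heights ((1:Int) + (m:Int)) 0 -
               PySem.List.pyGetD heights ((1:Int) + (m:Int) - (1 + (jm1:Int))) 0|)
          else mc) none (List.range K)))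
    = tableC (fun t => heights.getD t 0) K (m+1) ++ List.replicate (N - 1 - (m+1)) (some (-1)) := by
  rw [show ((1:Int) + (m : Int)).toNat = m + 1 from by omega]
  have hinner : List.foldl (fun (mc : Option Int) (jm1 : Nat) =>
          if (1:Int) + (m:Int) - (1 + (jm1:Int)) ≥ 0 then
            omin mc (oadd (PySem.List.pyGetD
                (tableC (fun t => heights.getD t 0) K m ++
                  List.replicate (N - 1 - m) (some (-1))) ((1:Int) + (m:Int) - (1 + (jm1:Int))) none)
              |PySem.List.pyGetD heights ((1:Int) + (m:Int)) 0 -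
               PySem.List.pyGetD heights ((1:Int) + (m:Int) - (1 + (jm1:Int))) 0|)
          else mc) none (List.range K)
      = nextVal (fun t => heights.getD t 0) K (tableC (fun t => heights.getD t 0) K m) := by
    unfold nextVal
    rw [length_tableC]
    apply PySem.List.foldl_congr_mem
    intro mc jm1 _
    by_cases hj : jm1 ≤ m
    · rw [if_pos (by omega), if_pos (by omega)]
      rw [show (1:Int) + (m:Int) - (1 + (jm1:Int)) = ((m - jm1 : Nat) : Int) from by omega,
          show (1:Int) + (m:Int) = ((m + 1 : Nat) : Int) from by omega,
          PySem.List.pyGetD_natCast, PySem.List.pyGetD_natCast, PySem.List.pyGetD_natCast,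
          List.getD_append _ _ _ _ (by rw [length_tableC]; omega),
          show m + 1 - (jm1 + 1) = m - jm1 from by omega]
      rfl
    · rw [if_neg (by omega), if_neg (by omega)]
  rw [hinner]
  rw [show N - 1 - m = (N - 1 - (m+1)) + 1 from by omega, List.replicate_succ]
  rw [set_append_cons' _ _ _ _ _ (by rw [length_tableC])]
  rw [show tableC (fun t => heights.getD t 0) K (m+1)
        = tableC (fun t => heights.getD t 0) K m ++
          [nextVal (fun t => heights.getD t 0) K (tableC (fun t => heights.getD t 0) K m)] from rfl]
  simp

-- effect of relaxing, in order, the outgoing edges of source index m on the sweep state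
theorem Bstep (heights : List Int) (n : Int) (K N m : Nat)
    (hnN : (N : Int) = n) (hm : m < N) :
    List.foldl
      (fun (dp : List (Option Int)) (jm1 : Nat) =>
        if (m : Int) + (1 + (jm1:Int)) < n then relaxE dp (Ei heights m jm1) else dp)
      ((List.range N).map (fun t => Pfun (fun t => heights.getD t 0) K m t))
      (List.range K)
    = (List.range N).map (fun t => Pfun (fun t => heights.getD t 0) K (m+1) t) := by
  have hQ : ∀ jn, jn ≤ K →
      List.foldl
      (fun (dp : List (Option Int)) (jm1 : Nat) =>
        if (m : Int) + (1 + (jm1:Int)) < n then relaxE dp (Ei heights m jm1) else dp)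
        ((List.range N).map (fun t => Pfun (fun t => heights.getD t 0) K m t))
        (List.range jn)
      = (List.range N).map (fun t =>
          if m < t ∧ t - m ≤ jn then
            omin (Pfun (fun t => heights.getD t 0) K m t)
              (oadd (Fv (fun t => heights.getD t 0) K m) (edgeC (fun t => heights.getD t 0) t m))
          else Pfun (fun t => heights.getD t 0) K m t) := by
    intro jn
    induction jn with
    | zero =>
      intro _
      rw [List.range_zero, List.foldl_nil]
      apply List.map_congr_left
      intro t _
      rw [if_neg (by omega)]
    | succ jn ih =>
      intro hjn
      rw [List.range_succ, List.foldl_append, ih (by omega)]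
      simp only [List.foldl_cons, List.foldl_nil, relaxE, Ei]
      by_cases hlt : m + jn + 1 < N
      · rw [if_pos (show (m:Int) + (1 + (jn:Int)) < n from by omega)]
        rw [show (m:Int) + (1 + (jn:Int)) = ((m + jn + 1 : Nat) : Int) from by omega]
        simp only [PySem.List.pyGetD_natCast, Int.toNat_natCast]
        rw [PySem.List.getD_map_range _ N m none hm]
        rw [if_neg (show ¬(m < m ∧ m - m ≤ jn) from by omega), Pfun_diag]
        rw [relax_eq_set_omin]
        rw [PySem.List.getD_map_range _ N (m + jn + 1) none hlt]
        rw [if_neg (show ¬(m < m + jn + 1 ∧ m + jn + 1 - m ≤ jn) from by omega)]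
        rw [set_map_range]
        apply List.map_congr_left
        intro t ht
        simp only [List.mem_range] at ht
        by_cases h1 : t = m + jn + 1
        · subst h1
          rw [if_pos rfl, if_pos (by omega)]
          rfl
        · rw [if_neg h1]
          by_cases h2 : m < t ∧ t - m ≤ jn
          · rw [if_pos h2, if_pos (by omega)]
          · rw [if_neg h2, if_neg (by omega)]
      · rw [if_neg (show ¬((m:Int) + (1 + (jn:Int)) < n) from by omega)]
        apply List.map_congr_left
        intro t ht
        simp only [List.mem_range] at ht
        by_cases h2 : m < t ∧ t - m ≤ jn
        · rw [if_pos h2, if_pos (by omega)]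
        · rw [if_neg h2, if_neg (by omega)]
  rw [hQ K le_rfl]
  apply List.map_congr_left
  intro t _
  rw [Pfun_succ]

-- characterization of the edge list B builds
theorem edges_eq (heights : List Int) (n k : Int) (hn : 0 ≤ n) :
    (PySem.List.pyRange 0 n 1).foldl (fun es i =>
      (PySem.List.pyRange 1 (k+1) 1).foldl (fun es j =>
        if i + j < n then
          es ++ [(i, i + j, |PySem.List.pyGetD heights (i + j) 0 - PySem.List.pyGetD heights i 0|)]
        else es) es) ([] : List (Int × Int × Int))
    = (List.range n.toNat).flatMap (fun (i : Nat) =>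
        ((List.range k.toNat).filter
          (fun (jm1 : Nat) => decide ((i:Int) + (1 + (jm1:Int)) < n))).map (Ei heights i)) := by
  have hrange0 : PySem.List.pyRange 0 n 1 = (List.range n.toNat).map (fun mm : Nat => (mm:Int)) := by
    rw [PySem.List.pyRange_one, show (n - 0).toNat = n.toNat from by omega]
    apply List.map_congr_left
    intro a _
    simp
  have hrangeK : PySem.List.pyRange 1 (k+1) 1
      = (List.range k.toNat).map (fun jm1 : Nat => (1:Int) + (jm1:Int)) := by
    rw [PySem.List.pyRange_one, show (k + 1 - 1).toNat = k.toNat from by omega]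
  rw [hrange0, hrangeK, List.foldl_map]
  have hin : ∀ (i : Nat) (es : List (Int × Int × Int)),
      List.foldl (fun es (j : Int) =>
        if (i:Int) + j < n then
          es ++ [((i:Int), (i:Int) + j,
            |PySem.List.pyGetD heights ((i:Int) + j) 0 - PySem.List.pyGetD heights (i:Int) 0|)]
        else es) es ((List.range k.toNat).map (fun jm1 : Nat => (1:Int) + (jm1:Int)))
      = es ++ ((List.range k.toNat).filter
          (fun (jm1 : Nat) => decide ((i:Int) + (1 + (jm1:Int)) < n))).map (Ei heights i) := by
    intro i es
    rw [List.foldl_map]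
    rw [PySem.List.foldl_congr_mem _ _
      (fun (es' : List (Int × Int × Int)) (jm1 : Nat) =>
        if ((fun (jm1 : Nat) => decide ((i:Int) + (1 + (jm1:Int)) < n)) jm1) = true then
          es' ++ [Ei heights i jm1] else es') _
      (by intro acc x _; simp [Ei])]
    exact PySem.List.foldl_append_if _ _ _ _
  rw [PySem.List.foldl_congr_mem _ _
    (fun (es : List (Int × Int × Int)) (i : Nat) =>
      es ++ ((List.range k.toNat).filter
        (fun (jm1 : Nat) => decide ((i:Int) + (1 + (jm1:Int)) < n))).map (Ei heights i)) _
    (by intro acc x _; exact hin x acc)]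
  rw [PySem.List.foldl_append_eq_flatMap]
  simp

-- the dp component of a pass ignores the changed flag
theorem fst_bfPass (edges : List (Int × Int × Int)) (dp : List (Option Int)) :
    (bfPass edges dp).1 = edges.foldl relaxE dp := by
  suffices h : ∀ (st : List (Option Int) × Bool),
      (edges.foldl (fun st e =>
        if olt (oadd (PySem.List.pyGetD st.1 e.1 none) e.2.2)
               (PySem.List.pyGetD st.1 e.2.1 none) then
          (st.1.set e.2.1.toNat (oadd (PySem.List.pyGetD st.1 e.1 none) e.2.2), true)
        else st) st).1 = edges.foldl relaxE st.1 from h (dp, false)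
  induction edges with
  | nil => intro st; rfl
  | cons e es ih =>
    intro st
    simp only [List.foldl_cons]
    by_cases hc : olt (oadd (PySem.List.pyGetD st.1 e.1 none) e.2.2)
        (PySem.List.pyGetD st.1 e.2.1 none) = true
    · rw [if_pos hc, ih]
      congr 1
      simp [relaxE, hc]
    · rw [if_neg hc, ih]
      congr 1
      simp only [relaxE]
      rw [if_neg hc]

-- after one pass over the (source-ordered) edge list starting from dp0, dp holds Fv
theorem pass_one (heights : List Int) (n k : Int) (hn : 1 ≤ n) :
    (bfPass ((List.range n.toNat).flatMap (fun (i : Nat) =>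
        ((List.range k.toNat).filter
          (fun (jm1 : Nat) => decide ((i:Int) + (1 + (jm1:Int)) < n))).map (Ei heights i)))
      ((List.replicate n.toNat (none : Option Int)).set 0 (some 0))).1
    = (List.range n.toNat).map (fun t => Fv (fun t => heights.getD t 0) k.toNat t) := by
  rw [fst_bfPass, List.foldl_flatMap]
  have hstep : ∀ (i : Nat) (dp : List (Option Int)),
      List.foldl relaxE dp (((List.range k.toNat).filter
          (fun (jm1 : Nat) => decide ((i:Int) + (1 + (jm1:Int)) < n))).map (Ei heights i))
      = List.foldl (fun dp (jm1 : Nat) =>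
          if (i:Int) + (1 + (jm1:Int)) < n then relaxE dp (Ei heights i jm1) else dp)
          dp (List.range k.toNat) := by
    intro i dp
    rw [List.foldl_map, List.foldl_filter]
    apply PySem.List.foldl_congr_mem
    intro acc x _
    simp
  have hnN : ((n.toNat : Nat) : Int) = n := by omega
  have hB : ∀ mm, mm ≤ n.toNat →
      List.foldl (fun (dp : List (Option Int)) (i : Nat) =>
          List.foldl relaxE dp (((List.range k.toNat).filter
            (fun (jm1 : Nat) => decide ((i:Int) + (1 + (jm1:Int)) < n))).map (Ei heights i)))
        ((List.replicate n.toNat (none : Option Int)).set 0 (some 0)) (List.range mm)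
      = (List.range n.toNat).map (fun t => Pfun (fun t => heights.getD t 0) k.toNat mm t) := by
    intro mm
    induction mm with
    | zero =>
      intro _
      rw [List.range_zero, List.foldl_nil]
      apply List.ext_getElem
      · simp
      · intro idx h1 h2
        simp only [List.getElem_set, List.getElem_replicate, List.getElem_map, List.getElem_range]
        unfold Pfun
        rw [List.range_zero, List.foldl_nil]
        split_ifs <;> first | rfl | omega
    | succ mm ih =>
      intro hmm
      rw [List.range_succ, List.foldl_append, ih (by omega)]
      simp only [List.foldl_cons, List.foldl_nil]
      rw [hstep]
      exact Bstep heights n k.toNat n.toNat mm hnN (by omega)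
  rw [hB n.toNat le_rfl]
  apply List.map_congr_left
  intro t ht
  simp only [List.mem_range] at ht
  rw [Pfun_stable _ _ (show t ≤ n.toNat from by omega), Pfun_diag]

-- every inequality Fv v ≤ Fv u + w along an edge holds, so a pass over the optimal table is a no-op
theorem olt_omin_left (z a b : Option Int) (h : olt z a = false) : olt z (omin a b) = false := by
  cases z <;> cases a <;> cases b <;> simp_all [olt, omin] <;> omega

theorem olt_self_omin (a b : Option Int) : olt b (omin a b) = false := by
  cases a <;> cases b <;> simp [olt, omin]

theorem foldl_omin_mono (l : List Nat) (q : Nat → Prop) [DecidablePred q]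
    (g : Nat → Option Int) (z acc : Option Int) (h : olt z acc = false) :
    olt z (l.foldl (fun mc j => if q j then omin mc (g j) else mc) acc) = false := by
  induction l generalizing acc with
  | nil => exact h
  | cons y l ih =>
    simp only [List.foldl_cons]
    apply ih
    by_cases hy : q y
    · rw [if_pos hy]
      exact olt_omin_left z acc (g y) h
    · rw [if_neg hy]
      exact h

theorem foldl_omin_le (l : List Nat) (q : Nat → Prop) [DecidablePred q]
    (g : Nat → Option Int) (acc : Option Int) {x : Nat} (hx : x ∈ l) (hq : q x) :
    olt (g x) (l.foldl (fun mc j => if q j then omin mc (g j) else mc) acc) = false := by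
  induction l generalizing acc with
  | nil => exact absurd hx (List.not_mem_nil)
  | cons y l ih =>
    simp only [List.foldl_cons]
    rcases List.mem_cons.mp hx with rfl | hx'
    · rw [if_pos hq]
      exact foldl_omin_mono l q g (g x) (omin acc (g x)) (olt_self_omin acc (g x))
    · exact ih _ hx'

theorem noop_cond (H : Nat → Int) (K i jm1 : Nat) (hj : jm1 < K) :
    olt (oadd (Fv H K i) (edgeC H (i + jm1 + 1) i)) (Fv H K (i + jm1 + 1)) = false := by
  have hle := foldl_omin_le (List.range K) (fun jm1' => jm1' + 1 ≤ (i + jm1) + 1)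
    (fun jm1' => oadd (Fv H K ((i + jm1) - jm1')) (edgeC H ((i + jm1) + 1) ((i + jm1) - jm1')))
    none (List.mem_range.mpr hj) (by omega)
  have hsub : i + jm1 - jm1 = i := by omega
  rw [Fv_succ']
  simpa [hsub] using hle

theorem foldl_const_of_mem {α σ : Type} (l : List α) (f : σ → α → σ) (s : σ)
    (h : ∀ x ∈ l, f s x = s) : l.foldl f s = s := by
  induction l with
  | nil => rfl
  | cons y l ih =>
    simp only [List.foldl_cons]
    rw [h y (List.mem_cons_self)]
    exact ih (fun x hx => h x (List.mem_cons_of_mem _ hx))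

theorem pass_noop (heights : List Int) (n k : Int) (hn : 1 ≤ n) :
    bfPass ((List.range n.toNat).flatMap (fun (i : Nat) =>
        ((List.range k.toNat).filter
          (fun (jm1 : Nat) => decide ((i:Int) + (1 + (jm1:Int)) < n))).map (Ei heights i)))
      ((List.range n.toNat).map (fun t => Fv (fun t => heights.getD t 0) k.toNat t))
    = ((List.range n.toNat).map (fun t => Fv (fun t => heights.getD t 0) k.toNat t), false) := by
  unfold bfPass
  apply foldl_const_of_mem
  intro e he
  simp only [List.mem_flatMap, List.mem_map, List.mem_filter, List.mem_range] at he
  obtain ⟨i, hi, jm1, ⟨hj, hdec⟩, rfl⟩ := he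
  have hlt : (i:Int) + (1 + (jm1:Int)) < n := by simpa using hdec
  have hnN : ((n.toNat : Nat) : Int) = n := by omega
  have hb2 : i + jm1 + 1 < n.toNat := by omega
  have hcast : (i:Int) + (1 + (jm1:Int)) = ((i + jm1 + 1 : Nat) : Int) := by push_cast; ring
  have hfalse := noop_cond (fun t => heights.getD t 0) k.toNat i jm1 hj
  simp only [edgeC] at hfalse
  simp only [Ei, hcast, PySem.List.pyGetD_natCast,
    PySem.List.getD_map_range _ _ i none hi,
    PySem.List.getD_map_range _ _ (i + jm1 + 1) none hb2]
  rw [if_neg (by rw [hfalse]; exact Bool.false_ne_true)]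

theorem bfLoop_fix (edges : List (Int × Int × Int)) (dp : List (Option Int))
    (hp : bfPass edges dp = (dp, false)) : ∀ t, bfLoop edges t dp = dp := by
  intro t
  induction t with
  | zero => rfl
  | succ t ih => simp [bfLoop, hp]

theorem bfLoop_result (edges : List (Int × Int × Int)) (dp0 dpOpt : List (Option Int))
    (h1 : (bfPass edges dp0).1 = dpOpt) (hp : bfPass edges dpOpt = (dpOpt, false)) (t : Nat) :
    bfLoop edges (t+1) dp0 = dpOpt := by
  show (if (bfPass edges dp0).2 then bfLoop edges t (bfPass edges dp0).1
        else (bfPass edges dp0).1) = dpOpt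
  rw [h1]
  split_ifs
  · exact bfLoop_fix edges dpOpt hp t
  · rfl

theorem AB_eq (heights : List Int) (n k : Int) (hn : 1 ≤ n) :
    minimalCost2 heights n k = minimalCost2_alt heights n k := by
  rcases eq_or_lt_of_le hn with h1 | h2
  · -- n = 1: both programs return dp[0] = 0 without looking at heights
    subst h1
    have e1 : PySem.List.pyRange 1 1 1 = [] := by
      rw [PySem.List.pyRange_one]
      norm_num
    norm_num [minimalCost2, minimalCost2_alt, e1, bfLoop, PySem.List.pyGetD]
  · have hrange1 : PySem.List.pyRange 1 n 1
        = (List.range (n.toNat - 1)).map (fun mm : Nat => (1:Int) + (mm:Int)) := by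
      rw [PySem.List.pyRange_one, show (n - 1).toNat = n.toNat - 1 from by omega]
    have hrangeK : PySem.List.pyRange 1 (k+1) 1
        = (List.range k.toNat).map (fun jm1 : Nat => (1:Int) + (jm1:Int)) := by
      rw [PySem.List.pyRange_one, show (k + 1 - 1).toNat = k.toNat from by omega]
    have hAval : minimalCost2 heights n k
        = (Fv (fun t => heights.getD t 0) k.toNat (n.toNat - 1)).getD 0 := by
      simp only [minimalCost2, hrange1, hrangeK, List.foldl_map]
      have hA : ∀ mm, mm ≤ n.toNat - 1 →
          List.foldl (fun (dp : List (Option Int)) (mm : Nat) =>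
              dp.set ((1:Int) + (mm:Int)).toNat
                (List.foldl (fun (mc : Option Int) (jm1 : Nat) =>
                    if (1:Int) + (mm:Int) - (1 + (jm1:Int)) ≥ 0 then
                      omin mc (oadd (PySem.List.pyGetD dp ((1:Int) + (mm:Int) - (1 + (jm1:Int))) none)
                        |PySem.List.pyGetD heights ((1:Int) + (mm:Int)) 0 -
                         PySem.List.pyGetD heights ((1:Int) + (mm:Int) - (1 + (jm1:Int))) 0|)
                    else mc) none (List.range k.toNat)))
            ((List.replicate n.toNat (some (-1))).set 0 (some 0)) (List.range mm)
          = tableC (fun t => heights.getD t 0) k.toNat mm ++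
              List.replicate (n.toNat - 1 - mm) (some (-1)) := by
        intro mm
        induction mm with
        | zero =>
          intro _
          rw [List.range_zero, List.foldl_nil]
          obtain ⟨N', hN'⟩ : ∃ N', n.toNat = N' + 1 := ⟨n.toNat - 1, by omega⟩
          rw [hN']
          simp [List.replicate_succ, tableC]
        | succ mm ih =>
          intro hmm
          rw [List.range_succ, List.foldl_append, ih (by omega)]
          simp only [List.foldl_cons, List.foldl_nil]
          exact Astep heights n.toNat k.toNat mm hmm
      rw [hA (n.toNat - 1) le_rfl]
      rw [show n.toNat - 1 - (n.toNat - 1) = 0 from by omega, List.replicate_zero,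
          List.append_nil]
      rw [show n - 1 = ((n.toNat - 1 : Nat) : Int) from by omega, PySem.List.pyGetD_natCast]
      rw [tableC_getD _ _ (le_refl (n.toNat - 1))]
    have hBval : minimalCost2_alt heights n k
        = (Fv (fun t => heights.getD t 0) k.toNat (n.toNat - 1)).getD 0 := by
      simp only [minimalCost2_alt]
      rw [edges_eq heights n k (by omega)]
      rw [show (n - 1).toNat = (n.toNat - 2) + 1 from by omega]
      rw [bfLoop_result _ _ _ (pass_one heights n k (by omega)) (pass_noop heights n k (by omega))]
      rw [show n - 1 = ((n.toNat - 1 : Nat) : Int) from by omega, PySem.List.pyGetD_natCast]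
      rw [PySem.List.getD_map_range _ n.toNat (n.toNat - 1) none (by omega)]
    rw [hAval, hBval]

-- ===== VERDICT (by name: the statement is the Claim_ definition above) =====
theorem minimalCost2_spec : Claim_equal_minimalCost2 := by
  intro heights n k _ hpre
  unfold Spec_minimalCost2
  have hn : 1 ≤ n := by rcases hpre with h | ⟨h, _, _⟩ <;> omega
  exact AB_eq heights n k hn
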